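-- pv_equiv track=rewrite | github.com/tsengwoody/Access8Math | addon/globalPlugins/Access8Math/runtime_loader.py | _infer_version_year_from_python
-- ===== SOURCE A (Python) =====
-- PYTHON_VERSION_TO_YEAR = {
-- 	(3, 11): 2025,
-- 	(3, 13): 2026,
-- }
--
-- def _infer_version_year_from_python(python_version):
-- 	inferred_year = PYTHON_VERSION_TO_YEAR.get(python_version)
-- 	if inferred_year is not None:
-- 		return inferred_year
--
-- 	known_versions = sorted(PYTHON_VERSION_TO_YEAR)
-- 	if python_version <= known_versions[0]:
-- 		return PYTHON_VERSION_TO_YEAR[known_versions[0]]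
-- 	if python_version >= known_versions[-1]:
-- 		return PYTHON_VERSION_TO_YEAR[known_versions[-1]]
--
-- 	previous_version = known_versions[0]
-- 	for known_version in known_versions[1:]:
-- 		if python_version < known_version:
-- 			return PYTHON_VERSION_TO_YEAR[previous_version]
-- 		previous_version = known_version
-- 	return PYTHON_VERSION_TO_YEAR[known_versions[-1]]
-- ===== SOURCE B (Python) =====
-- PYTHON_VERSION_TO_YEAR = {
-- 	(3, 11): 2025,
-- 	(3, 13): 2026,
-- }
--
-- def _infer_version_year_from_python(python_version):
-- 	# Binary search (bisect_right) over the sorted known versions, clamped to the floor key.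
-- 	keys = sorted(PYTHON_VERSION_TO_YEAR)
-- 	lo, hi = 0, len(keys)
-- 	while lo < hi:
-- 		mid = (lo + hi) // 2
-- 		if keys[mid] <= python_version:
-- 			lo = mid + 1
-- 		else:
-- 			hi = mid
-- 	return PYTHON_VERSION_TO_YEAR[keys[max(lo - 1, 0)]]
-- ===== Notes on version B (the rewrite author's own statement) =====
-- stated objective: idiomatic
-- what changed: Replaces the exact-match dict lookup, the two boundary guards and the linear scan with a single hand-written bisect_right binary search over the sorted keys plus a clamped floor index.
import Mathlib
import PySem

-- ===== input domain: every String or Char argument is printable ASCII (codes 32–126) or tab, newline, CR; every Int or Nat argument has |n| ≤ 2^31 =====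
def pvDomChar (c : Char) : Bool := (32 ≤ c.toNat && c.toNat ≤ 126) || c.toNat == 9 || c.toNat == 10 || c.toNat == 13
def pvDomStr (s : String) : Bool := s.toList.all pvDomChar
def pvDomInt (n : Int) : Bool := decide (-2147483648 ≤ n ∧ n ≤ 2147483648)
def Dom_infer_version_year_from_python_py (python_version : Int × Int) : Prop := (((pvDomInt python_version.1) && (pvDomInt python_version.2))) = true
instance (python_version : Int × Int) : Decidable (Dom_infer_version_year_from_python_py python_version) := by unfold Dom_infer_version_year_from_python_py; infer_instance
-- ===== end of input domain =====

-- B replaces the exact-match lookup, boundary guards and linear scan with a bisect_right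
-- binary search over the sorted keys plus a clamped floor index (idiomatic; same result).


-- ===== PORT A =====
-- Python tuple comparison on pairs is lexicographic; exact on Int × Int.
def pvLexLe (a b : Int × Int) : Bool :=
  decide (a.1 < b.1) || (decide (a.1 = b.1) && decide (a.2 ≤ b.2))
def pvLexLt (a b : Int × Int) : Bool :=
  decide (a.1 < b.1) || (decide (a.1 = b.1) && decide (a.2 < b.2))

-- PYTHON_VERSION_TO_YEAR, as a PySem.Dict (insertion order of the literal).
def pvYearDict : PySem.Dict (Int × Int) Int :=
  PySem.Dict.ofList [((3, 11), 2025), ((3, 13), 2026)]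

-- sorted(...) on pairs: insertion sort with the lexicographic order; exact on the
-- distinct keys of a dict (no equal elements, so stability is moot).
def pvInsort (x : Int × Int) : List (Int × Int) → List (Int × Int)
  | [] => [x]
  | y :: ys => if pvLexLe x y then x :: y :: ys else y :: pvInsort x ys

def pvSortedLex (l : List (Int × Int)) : List (Int × Int) := l.foldr pvInsort []

-- the 'for known_version in known_versions[1:]' loop with its early return;
-- klast = known_versions[-1] for the fall-through return.
def pvScanA (pv : Int × Int) (prev : Int × Int) (klast : Int × Int) :
    List (Int × Int) → Int
  | [] => pvYearDict.getD klast 0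
  | k :: ks => if pvLexLt pv k then pvYearDict.getD prev 0 else pvScanA pv k klast ks

def infer_version_year_from_python_py (python_version : Int × Int) : Int :=
  match pvYearDict.get? python_version with
  | some y => y
  | none =>
    let known := pvSortedLex pvYearDict.keys
    match known with
    | [] => 0  -- unreachable: the dict literal is nonempty
    | k0 :: rest =>
      -- dict[k] with k drawn from the dict's own keys never raises: getD is exact here
      if pvLexLe python_version k0 then pvYearDict.getD k0 0
      else
        let klast := (k0 :: rest).getLast (by simp)
        if pvLexLe klast python_version then pvYearDict.getD klast 0
        else pvScanA python_version k0 klast rest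

-- ===== PORT B =====
-- the hand-written bisect_right while-loop of Source B; keys[mid] is in range whenever
-- lo < hi ≤ keys.length, so getD's default is never used there.
def pvBisectRight (keys : List (Int × Int)) (pv : Int × Int) (lo hi : Nat) : Nat :=
  if h : lo < hi then
    let mid := (lo + hi) / 2
    if pvLexLe (keys.getD mid (0, 0)) pv then pvBisectRight keys pv (mid + 1) hi
    else pvBisectRight keys pv lo mid
  else lo
termination_by hi - lo
decreasing_by all_goals omega

def infer_version_year_from_python_py_alt (python_version : Int × Int) : Int :=
  let keys := pvSortedLex pvYearDict.keys
  let lo := pvBisectRight keys python_version 0 keys.length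
  pvYearDict.getD (keys.getD (max (lo - 1) 0) (0, 0)) 0

-- ===== PRECONDITION & SPEC =====
def Spec_infer_version_year_from_python_py (python_version : Int × Int) (out : Int) : Prop := out = infer_version_year_from_python_py_alt python_version
instance (python_version : Int × Int) (out : Int) : Decidable (Spec_infer_version_year_from_python_py python_version out) := by unfold Spec_infer_version_year_from_python_py; infer_instance

-- ===== CLAIM (what is proved, stated in full; the proofs are below) =====
def Claim_equal_infer_version_year_from_python_py : Prop := ∀ (python_version : Int × Int), Dom_infer_version_year_from_python_py python_version → Spec_infer_version_year_from_python_py python_version (infer_version_year_from_python_py python_version)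

-- ===== LEMMAS AND PROOFS =====
-- concrete evaluations of the shared constants
lemma pv_dict_eq : pvYearDict = PySem.Dict.mk [((3, 11), 2025), ((3, 13), 2026)] := by rfl
lemma pv_keys_eq : pvSortedLex pvYearDict.keys = [((3, 11) : Int × Int), (3, 13)] := by rfl
lemma pv_get_nil (x : Int × Int) :
    (PySem.Dict.mk ([] : List ((Int × Int) × Int))).get? x = none := rfl
lemma pv_g1 : (pvYearDict.get? ((3, 11) : Int × Int)).getD 0 = 2025 := rfl
lemma pv_g2 : (pvYearDict.get? ((3, 13) : Int × Int)).getD 0 = 2026 := rfl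

-- Both sides return 2026 exactly when (3,13) ≤lex python_version, else 2025.
lemma pvA_char (a b : Int) :
    infer_version_year_from_python_py (a, b) =
      if 3 < a ∨ (3 = a ∧ (13:Int) ≤ b) then 2026 else 2025 := by
  unfold infer_version_year_from_python_py
  rw [pv_keys_eq, pv_dict_eq]
  simp only [PySem.Dict.get?_mk_cons, pv_get_nil, pv_g1, pv_g2, pvLexLe, pvLexLt, pvScanA,
    List.getLast, PySem.Dict.getD, beq_iff_eq, Prod.mk.injEq, decide_eq_true_eq,
    Bool.or_eq_true, Bool.and_eq_true]
  split_ifs <;> (try (exfalso; omega)) <;> simp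

lemma pvB_char (a b : Int) :
    infer_version_year_from_python_py_alt (a, b) =
      if 3 < a ∨ (3 = a ∧ (13:Int) ≤ b) then 2026 else 2025 := by
  unfold infer_version_year_from_python_py_alt
  rw [pv_keys_eq, pv_dict_eq]
  by_cases h1 : pvLexLe (3, 11) (a, b) = true <;>
  by_cases h2 : pvLexLe (3, 13) (a, b) = true <;>
  simp only [pvLexLe, decide_eq_true_eq, Bool.or_eq_true, Bool.and_eq_true] at h1 h2 <;>
  simp [pvBisectRight, h1, h2, pvLexLe, PySem.Dict.getD, PySem.Dict.get?_mk_cons,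
    Prod.mk.injEq]

-- ===== VERDICT (by name: the statement is the Claim_ definition above) =====
theorem infer_version_year_from_python_py_spec : Claim_equal_infer_version_year_from_python_py := by
  rintro ⟨a, b⟩ _
  unfold Spec_infer_version_year_from_python_py
  rw [pvA_char, pvB_char]
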